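-- pv_equiv track=rewrite | github.com/CDMY0417/Tool_MATH | function_tools/function_total/s9rxn2.py | combine_factors_to_limit
-- ===== SOURCE A (Python) =====
-- def combine_factors_to_limit(factors: list[int], limit: int):
--     from itertools import combinations
--     products = []
--     for r in range(1, len(factors) + 1):
--         for combo in combinations(factors, r):
--             product = 1
--             for f in combo:
--                 product *= f
--             if product <= limit:
--                 products.append(product)
--     return products
-- ===== SOURCE B (Python) =====
-- def combine_factors_to_limit(factors: list[int], limit: int):
--     # level-by-level: products of size-r combinations are built from the
--     # (product, last_index) pairs of size r-1, one multiplication each;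
--     # lexicographic order of r-tuples groups by lex-ordered (r-1)-prefixes,
--     # so each level comes out in combinations order.
--     n = len(factors)
--     out = []
--     level = [(1, -1)]
--     for _ in range(n):
--         level = [(prod * factors[i], i)
--                  for prod, j in level
--                  for i in range(j + 1, n)]
--         out.extend(p for p, _j in level if p <= limit)
--     return out
-- ===== Notes on version B (the rewrite author's own statement) =====
-- stated objective: alternative
-- what changed: Replaces itertools.combinations plus an inner loop that recomputes each combination's product from scratch by a level-by-level construction that extends each size-(r-1) (product, last_index) pair with one multiplication per new combination.
import Mathlib
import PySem

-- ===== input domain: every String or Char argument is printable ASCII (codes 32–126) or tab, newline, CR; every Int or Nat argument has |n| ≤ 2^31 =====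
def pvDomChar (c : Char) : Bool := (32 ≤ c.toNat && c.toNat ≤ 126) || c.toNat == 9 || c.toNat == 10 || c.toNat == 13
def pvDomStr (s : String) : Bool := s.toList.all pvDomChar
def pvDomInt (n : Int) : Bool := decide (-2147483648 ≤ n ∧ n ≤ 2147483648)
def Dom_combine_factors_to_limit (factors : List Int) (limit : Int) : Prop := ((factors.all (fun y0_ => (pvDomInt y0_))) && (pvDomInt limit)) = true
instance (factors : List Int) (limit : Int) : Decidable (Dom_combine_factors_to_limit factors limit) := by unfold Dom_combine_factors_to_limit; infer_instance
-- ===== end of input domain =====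

-- B replaces A's per-combination product recomputation (itertools.combinations + an inner
-- multiply loop) by a level-by-level construction of (product, last_index) pairs, one
-- multiplication per combination; a genuinely different traversal, similar cost in practice.

-- ===== PORT A =====
-- itertools.combinations(factors, r) in lexicographic index order (hand port of the library call)
def pyCombinations : List Int → Nat → List (List Int)
  | _, 0 => [[]]
  | [], _ + 1 => []
  | x :: xs, r + 1 => (pyCombinations xs r).map (fun c => x :: c) ++ pyCombinations xs (r + 1)

def combine_factors_to_limit (factors : List Int) (limit : Int) : List Int :=
  (PySem.List.pyRange 1 ((factors.length : Int) + 1) 1).foldl (fun products r =>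
    (pyCombinations factors r.toNat).foldl (fun products combo =>
      let product := combo.foldl (fun product f => product * f) 1
      if product ≤ limit then products ++ [product] else products) products) []

-- ===== PORT B =====
-- the list comprehension building the next level from the current one
def nextLevel (factors : List Int) (n : Int) (level : List (Int × Int)) : List (Int × Int) :=
  level.flatMap (fun pj =>
    (PySem.List.pyRange (pj.2 + 1) n 1).map (fun i => (pj.1 * PySem.List.pyGetD factors i 0, i)))

def combine_factors_to_limit_alt (factors : List Int) (limit : Int) : List Int :=
  ((List.range factors.length).foldl
    (fun (st : List Int × List (Int × Int)) _ =>
      let level := nextLevel factors (factors.length : Int) st.2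
      (st.1 ++ level.filterMap (fun pj => if pj.1 ≤ limit then some pj.1 else none), level))
    ([], [((1 : Int), (-1 : Int))])).1

-- ===== PRECONDITION & SPEC =====
def Spec_combine_factors_to_limit (factors : List Int) (limit : Int) (out : List Int) : Prop := out = combine_factors_to_limit_alt factors limit
instance (factors : List Int) (limit : Int) (out : List Int) : Decidable (Spec_combine_factors_to_limit factors limit out) := by unfold Spec_combine_factors_to_limit; infer_instance

-- ===== CLAIM (what is proved, stated in full; the proofs are below) =====
def Claim_equal_combine_factors_to_limit : Prop := ∀ (factors : List Int) (limit : Int), Dom_combine_factors_to_limit factors limit → Spec_combine_factors_to_limit factors limit (combine_factors_to_limit factors limit)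

-- ===== LEMMAS AND PROOFS =====

-- depth-first generator of the (product, last index) pairs of all r-element
-- combinations of indices > j, in lexicographic order, products seeded with p
def genG (factors : List Int) (n : Int) (p j : Int) : Nat → List (Int × Int)
  | 0 => [(p, j)]
  | r + 1 => (PySem.List.pyRange (j + 1) n 1).flatMap
      (fun i => genG factors n (p * PySem.List.pyGetD factors i 0) i r)

lemma nextLevel_genG (factors : List Int) (n : Int) (p j : Int) (r : Nat) :
    nextLevel factors n (genG factors n p j r) = genG factors n p j (r + 1) := by
  induction r generalizing p j with
  | zero =>
    simp only [nextLevel, genG, List.flatMap_cons, List.flatMap_nil, List.append_nil]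
    exact List.map_eq_flatMap
  | succ r ih =>
    show nextLevel factors n (genG factors n p j (r + 1)) = _
    simp only [genG, nextLevel, List.flatMap_assoc]
    exact List.flatMap_congr (fun i _ => ih _ i)

lemma genG_map_fst (factors : List Int) (p j : Int) (r : Nat) (xs : List Int)
    (hj : -1 ≤ j) (hxs : factors.drop (j + 1).toNat = xs) :
    (genG factors (factors.length : Int) p j r).map Prod.fst
      = (pyCombinations xs r).map (fun c => c.foldl (fun a b => a * b) p) := by
  induction xs generalizing p j r with
  | nil =>
    cases r with
    | zero => simp [genG, pyCombinations]
    | succ r =>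
      have hlen : (factors.length : Int) ≤ j + 1 := by
        have := List.drop_eq_nil_iff.mp hxs
        omega
      simp [genG, PySem.List.pyRange_one_eq_nil hlen, pyCombinations]
  | cons x xs ih =>
    have hlt : (j + 1).toNat < factors.length := by
      by_contra h
      rw [List.drop_eq_nil_of_le (by omega)] at hxs
      simp at hxs
    have hjn : j + 1 < (factors.length : Int) := by omega
    have h0 : factors[(j + 1).toNat]? = some x := by
      have h := congrArg (fun (l : List Int) => l[0]?) hxs
      simpa [List.getElem?_drop] using h
    have hget : PySem.List.pyGetD factors (j + 1) 0 = x := by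
      rw [PySem.List.pyGetD_of_nonneg factors 0 (by omega)]
      simp [List.getD_eq_getElem?_getD, h0]
    have hdrop : factors.drop (j + 1 + 1).toNat = xs := by
      have h2 : (j + 1 + 1).toNat = (j + 1).toNat + 1 := by omega
      rw [h2, ← List.drop_drop, hxs]
      simp
    cases r with
    | zero => simp [genG, pyCombinations]
    | succ r =>
      have hsplit : PySem.List.pyRange (j + 1) (factors.length : Int) 1
          = (j + 1) :: PySem.List.pyRange (j + 1 + 1) (factors.length : Int) 1 :=
        PySem.List.pyRange_one_cons hjn
      have hG : genG factors (factors.length : Int) p j (r + 1)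
          = genG factors (factors.length : Int) (p * x) (j + 1) r
            ++ genG factors (factors.length : Int) p (j + 1) (r + 1) := by
        show (PySem.List.pyRange (j + 1) (factors.length : Int) 1).flatMap _ = _
        rw [hsplit, List.flatMap_cons, hget]
        rfl
      rw [hG, List.map_append,
          ih (p * x) (j + 1) r (by omega) hdrop,
          ih p (j + 1) (r + 1) (by omega) hdrop]
      show _ = (pyCombinations (x :: xs) (r + 1)).map _
      simp only [pyCombinations, List.map_append, List.map_map]
      rfl

-- A's inner append-if loop is acc ++ a filterMap
lemma foldl_if_append (limit : Int) (l : List (List Int)) (acc : List Int) :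
    l.foldl (fun products combo =>
        if combo.foldl (fun product f => product * f) 1 ≤ limit
        then products ++ [combo.foldl (fun product f => product * f) 1] else products) acc
      = acc ++ l.filterMap (fun c =>
          if c.foldl (fun product f => product * f) 1 ≤ limit
          then some (c.foldl (fun product f => product * f) 1) else none) := by
  induction l generalizing acc with
  | nil => simp
  | cons c l ih =>
    simp only [List.foldl_cons, List.filterMap_cons]
    by_cases h : c.foldl (fun product f => product * f) 1 ≤ limit <;>
      simp [h, ih, List.append_assoc]

-- the filtered products of level r, as they appear in B
def filtLvl (factors : List Int) (limit : Int) (r : Nat) : List Int :=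
  (genG factors (factors.length : Int) 1 (-1) r).filterMap
    (fun pj => if pj.1 ≤ limit then some pj.1 else none)

-- B's loop state after k iterations
lemma altLoop (factors : List Int) (limit : Int) (k : Nat) :
    (List.range k).foldl
      (fun (st : List Int × List (Int × Int)) _ =>
        let level := nextLevel factors (factors.length : Int) st.2
        (st.1 ++ level.filterMap (fun pj => if pj.1 ≤ limit then some pj.1 else none), level))
      ([], [((1 : Int), (-1 : Int))])
    = ((List.range k).foldl (fun out m => out ++ filtLvl factors limit (m + 1)) [],
        genG factors (factors.length : Int) 1 (-1) k) := by
  induction k with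
  | zero => simp [genG]
  | succ k ih =>
    rw [List.range_succ, List.foldl_append, List.foldl_append, ih]
    simp only [List.foldl_cons, List.foldl_nil, nextLevel_genG]
    exact rfl

lemma filtLvl_eq (factors : List Int) (limit : Int) (r : Nat) :
    filtLvl factors limit r
      = (pyCombinations factors r).filterMap (fun c =>
          if c.foldl (fun product f => product * f) 1 ≤ limit
          then some (c.foldl (fun product f => product * f) 1) else none) := by
  unfold filtLvl
  have h1 : (genG factors (factors.length : Int) 1 (-1) r).filterMap
        (fun pj => if pj.1 ≤ limit then some pj.1 else none)
      = ((genG factors (factors.length : Int) 1 (-1) r).map Prod.fst).filterMap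
          (fun p => if p ≤ limit then some p else none) := by
    rw [List.filterMap_map]; rfl
  rw [h1, genG_map_fst factors 1 (-1) r factors (by omega) (by simp), List.filterMap_map]
  rfl

-- ===== VERDICT (by name: the statement is the Claim_ definition above) =====
theorem combine_factors_to_limit_spec : Claim_equal_combine_factors_to_limit := by
  intro factors limit _
  unfold Spec_combine_factors_to_limit combine_factors_to_limit combine_factors_to_limit_alt
  rw [altLoop]
  dsimp only
  rw [PySem.List.pyRange_one]
  have hcount : ((factors.length : Int) + 1 - 1).toNat = factors.length := by omega
  rw [hcount, List.foldl_map]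
  induction factors.length with
  | zero => simp
  | succ k ih =>
    rw [List.range_succ, List.foldl_append, List.foldl_append, ih]
    simp only [List.foldl_cons, List.foldl_nil]
    have hk : ((1 : Int) + (k : Nat)).toNat = k + 1 := by omega
    simp only [hk, foldl_if_append, filtLvl_eq]
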